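-- pv_equiv track=rewrite | github.com/pefem/bink_test | questions.py | question_three
-- ===== SOURCE A (Python) =====
-- def question_three(rows_obj):
--
--     tenant_list = []
--
--     for row in rows_obj:
--         tenant_list.append(row["Tenant Name"])
--
--     arqiva_mast_count = 0
--     vodafone_mast_count = 0
--     o2_mast_count = 0
--     everything_mast_count = 0
--     cornerstone_mast_count = 0
--
--     for item in tenant_list:
--
--         if "Arqiva" in item:
--             arqiva_mast_count += 1
--         elif "Vodafone" in item:
--             vodafone_mast_count += 1
--         elif "O2" in item:
--             o2_mast_count += 1
--         elif "Everything" in item: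
--             everything_mast_count += 1
--         elif "Cornerstone" in item:
--             cornerstone_mast_count += 1
--
--     return {
--         "Arqiva": arqiva_mast_count,
--         "Vodafone": vodafone_mast_count,
--         "O2": o2_mast_count,
--         "Everything": everything_mast_count,
--         "Cornerstone": cornerstone_mast_count
--     }
-- ===== SOURCE B (Python) =====
-- def question_three(rows_obj):
--     names = [row["Tenant Name"] for row in rows_obj]
--     keys = ["Arqiva", "Vodafone", "O2", "Everything", "Cornerstone"]
--     result = {}
--     for i, k in enumerate(keys):
--         earlier = keys[:i]
--         result[k] = sum(1 for n in names if k in n and not any(p in n for p in earlier))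
--     return result
-- ===== Notes on version B (the rewrite author's own statement) =====
-- stated objective: alternative
-- what changed: B counts column-wise: for each of the five keys (in order) it makes a filtered pass counting names that contain that key and none of the earlier keys, instead of A's single row-wise pass through an if/elif chain of five named counters.
import Mathlib
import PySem

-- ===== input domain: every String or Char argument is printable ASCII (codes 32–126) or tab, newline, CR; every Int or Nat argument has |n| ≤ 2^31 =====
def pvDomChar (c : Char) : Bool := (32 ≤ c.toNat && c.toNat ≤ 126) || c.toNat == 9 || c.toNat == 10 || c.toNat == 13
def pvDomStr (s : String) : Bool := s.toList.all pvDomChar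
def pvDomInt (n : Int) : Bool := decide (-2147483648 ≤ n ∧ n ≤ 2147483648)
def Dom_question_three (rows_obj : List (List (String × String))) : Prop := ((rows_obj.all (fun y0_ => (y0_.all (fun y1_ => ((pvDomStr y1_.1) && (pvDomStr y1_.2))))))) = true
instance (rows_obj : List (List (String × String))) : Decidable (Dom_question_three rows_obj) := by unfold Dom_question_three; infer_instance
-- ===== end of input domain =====

-- B counts column-wise: one filtered pass per key ("contains this key and no earlier key") instead of A's
-- single row-wise pass through an if/elif chain of five counters; same O(n) cost, simpler decomposition.

-- ===== PORT A =====
def question_three (rows_obj : List (List (String × String))) : List (String × Int) :=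
  let tenant_list := rows_obj.foldl (fun acc row => acc ++ [(PySem.Dict.mk row).getD "Tenant Name" ""]) []
  let s := tenant_list.foldl (fun (s : Int × Int × Int × Int × Int) item =>
      let (a, v, o, e, c) := s
      if PySem.Str.isIn "Arqiva" item then (a + 1, v, o, e, c)
      else if PySem.Str.isIn "Vodafone" item then (a, v + 1, o, e, c)
      else if PySem.Str.isIn "O2" item then (a, v, o + 1, e, c)
      else if PySem.Str.isIn "Everything" item then (a, v, o, e + 1, c)
      else if PySem.Str.isIn "Cornerstone" item then (a, v, o, e, c + 1)
      else (a, v, o, e, c)) (0, 0, 0, 0, 0)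
  [("Arqiva", s.1), ("Vodafone", s.2.1), ("O2", s.2.2.1),
   ("Everything", s.2.2.2.1), ("Cornerstone", s.2.2.2.2)]

-- ===== PORT B =====
def q3Keys : List String := ["Arqiva", "Vodafone", "O2", "Everything", "Cornerstone"]

def question_three_alt (rows_obj : List (List (String × String))) : List (String × Int) :=
  let names := rows_obj.map (fun row => (PySem.Dict.mk row).getD "Tenant Name" "")
  -- for i, k in enumerate(keys): result[k] = sum(1 for n in names if k in n and not any(p in n for p in keys[:i]))
  ((PySem.List.enumerate q3Keys).foldl (fun (d : PySem.Dict String Int) ik =>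
      let earlier := q3Keys.take ik.1.toNat   -- keys[:i], i ≥ 0
      d.insert ik.2 (names.foldl (fun (s : Int) n =>
        if PySem.Str.isIn ik.2 n && !(earlier.any (fun p => PySem.Str.isIn p n)) then s + 1 else s) 0))
    PySem.Dict.empty).items

-- ===== PRECONDITION & SPEC =====
-- Pre_ excludes exactly the rows with no "Tenant Name" key, on which Python A raises KeyError.
def Pre_question_three (rows_obj : List (List (String × String))) : Prop :=
  ∀ row ∈ rows_obj, (PySem.Dict.mk row).contains "Tenant Name" = true
instance (rows_obj : List (List (String × String))) : Decidable (Pre_question_three rows_obj) := by unfold Pre_question_three; infer_instance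
def pvWitness_question_three : (List (List (String × String))) := [[("Tenant Name", "Arqiva mast")]]

def Spec_question_three (rows_obj : List (List (String × String))) (out : List (String × Int)) : Prop := out = question_three_alt rows_obj
instance (rows_obj : List (List (String × String))) (out : List (String × Int)) : Decidable (Spec_question_three rows_obj out) := by unfold Spec_question_three; infer_instance

-- ===== CLAIM (what is proved, stated in full; the proofs are below) =====
def Claim_equal_question_three : Prop := ∀ (rows_obj : List (List (String × String))), Dom_question_three rows_obj → Pre_question_three rows_obj → Spec_question_three rows_obj (question_three rows_obj)

-- ===== LEMMAS AND PROOFS =====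

-- proof-side abbreviations: the five first-match predicates and a counting fold
def q3N (rows_obj : List (List (String × String))) : List String :=
  rows_obj.map (fun row => (PySem.Dict.mk row).getD "Tenant Name" "")
def q3c1 (n : String) : Bool := PySem.Str.isIn "Arqiva" n && !(([] : List String).any fun p => PySem.Str.isIn p n)
def q3c2 (n : String) : Bool := PySem.Str.isIn "Vodafone" n && !(["Arqiva"].any fun p => PySem.Str.isIn p n)
def q3c3 (n : String) : Bool := PySem.Str.isIn "O2" n && !(["Arqiva", "Vodafone"].any fun p => PySem.Str.isIn p n)
def q3c4 (n : String) : Bool := PySem.Str.isIn "Everything" n && !(["Arqiva", "Vodafone", "O2"].any fun p => PySem.Str.isIn p n)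
def q3c5 (n : String) : Bool := PySem.Str.isIn "Cornerstone" n && !(["Arqiva", "Vodafone", "O2", "Everything"].any fun p => PySem.Str.isIn p n)
def q3cnt (p : String → Bool) (ns : List String) : Int :=
  ns.foldl (fun (s : Int) n => if p n then s + 1 else s) 0

lemma q3cnt_shift (p : String → Bool) (ns : List String) : ∀ s : Int,
    ns.foldl (fun (s : Int) n => if p n then s + 1 else s) s = s + q3cnt p ns := by
  induction ns with
  | nil => intro s; simp [q3cnt]
  | cons n rest ih =>
      intro s
      rw [q3cnt, List.foldl_cons, List.foldl_cons, ih, ih]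
      split_ifs <;> ring

lemma q3cnt_cons (p : String → Bool) (n : String) (ns : List String) :
    q3cnt p (n :: ns) = (if p n then 1 else 0) + q3cnt p ns := by
  rw [q3cnt, List.foldl_cons, q3cnt_shift]
  split_ifs <;> ring

-- B's result, read off by reduction (keys are literals, so the dict pipeline evaluates)
lemma q3_alt_items (rows_obj : List (List (String × String))) :
    question_three_alt rows_obj =
      [("Arqiva", q3cnt q3c1 (q3N rows_obj)), ("Vodafone", q3cnt q3c2 (q3N rows_obj)),
       ("O2", q3cnt q3c3 (q3N rows_obj)), ("Everything", q3cnt q3c4 (q3N rows_obj)),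
       ("Cornerstone", q3cnt q3c5 (q3N rows_obj))] := rfl

-- A's five counters over the names = the five first-match counts
lemma q3_main (names : List String) : ∀ a v o e c : Int,
    names.foldl (fun (s : Int × Int × Int × Int × Int) item =>
      let (a, v, o, e, c) := s
      if PySem.Str.isIn "Arqiva" item then (a + 1, v, o, e, c)
      else if PySem.Str.isIn "Vodafone" item then (a, v + 1, o, e, c)
      else if PySem.Str.isIn "O2" item then (a, v, o + 1, e, c)
      else if PySem.Str.isIn "Everything" item then (a, v, o, e + 1, c)
      else if PySem.Str.isIn "Cornerstone" item then (a, v, o, e, c + 1)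
      else (a, v, o, e, c)) (a, v, o, e, c)
    = (a + q3cnt q3c1 names, v + q3cnt q3c2 names, o + q3cnt q3c3 names,
       e + q3cnt q3c4 names, c + q3cnt q3c5 names) := by
  induction names with
  | nil => intro a v o e c; simp [q3cnt]
  | cons n rest ih =>
      intro a v o e c
      rw [List.foldl_cons, q3cnt_cons, q3cnt_cons, q3cnt_cons, q3cnt_cons, q3cnt_cons]
      by_cases h1 : PySem.Str.isIn "Arqiva" n <;>
        by_cases h2 : PySem.Str.isIn "Vodafone" n <;>
          by_cases h3 : PySem.Str.isIn "O2" n <;>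
            by_cases h4 : PySem.Str.isIn "Everything" n <;>
              by_cases h5 : PySem.Str.isIn "Cornerstone" n <;>
                · simp only [h1, h2, h3, h4, h5, if_true, if_false, Bool.false_eq_true]
                  rw [ih]
                  simp only [q3c1, q3c2, q3c3, q3c4, q3c5, List.any_cons, List.any_nil,
                    h1, h2, h3, h4, h5, Bool.or_false, Bool.false_or, Bool.true_or,
                    Bool.not_true, Bool.not_false, Bool.and_true, Bool.and_false,
                    if_true, if_false,
                    Bool.false_eq_true, Prod.mk.injEq]
                  refine ⟨by ring, by ring, by ring, by ring, by ring⟩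

-- ===== VERDICT (by name: the statement is the Claim_ definition above) =====
theorem question_three_spec : Claim_equal_question_three := by
  intro rows _ _
  unfold Spec_question_three question_three
  rw [PySem.List.foldl_append_singleton_eq_map]
  simp only [List.nil_append]
  rw [q3_main _ 0 0 0 0 0, q3_alt_items]
  show _ = ([("Arqiva", q3cnt q3c1 (q3N rows)), ("Vodafone", q3cnt q3c2 (q3N rows)),
       ("O2", q3cnt q3c3 (q3N rows)), ("Everything", q3cnt q3c4 (q3N rows)),
       ("Cornerstone", q3cnt q3c5 (q3N rows))] : List (String × Int))
  simp only [q3N, zero_add]
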